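-- pv_equiv track=rewrite | github.com/ajinkyakadu/SpectralNonogram | app/utils.py | is_puzzle_solved
-- ===== SOURCE A (Python) =====
-- COLORS = ["blank", "danger", "success", "primary"]
--
-- def compute_color_sums(color_config):
--     """Computes the number of each color in a given configuration.
--
--     Args:
--         color_config (list): The color configuration to compute the sums for.
--
--     Returns:
--         List: A list containing the number of each color in the configuration,
--         excluding 'blank'.
--     """
--     # Count the number of each color in the configuration, excluding 'blank'
--     color_sums = [color_config.count(color) for color in COLORS[1:]]
--
--     return color_sums
--
-- def is_puzzle_solved(current_config, true_config, k):
--     """Checks if the current puzzle configuration matches the true configuration.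
--
--     Args:
--         current_config (list): The current color configuration of the puzzle.
--         true_config (list): The true color configuration of the puzzle.
--         k (int): The size of the puzzle (k x k).
--
--     Returns:
--         Bool: True if the puzzle is solved correctly, False otherwise.
--     """
--     # Compute the number of each color in each row and column of the current configuration
--     current_row_sums = [compute_color_sums(current_config[i*k:(i+1)*k]) for i in range(k)]
--     current_col_sums = [compute_color_sums(current_config[i::k]) for i in range(k)]
--
--     # Compute the number of each color in each row and column of the true configuration
--     true_row_sums = [compute_color_sums(true_config[i*k:(i+1)*k]) for i in range(k)]
--     true_col_sums = [compute_color_sums(true_config[i::k]) for i in range(k)]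
--
--     # Check if the current sums match the true sums
--     is_solved = all(curr == true for curr, true in zip(current_row_sums, true_row_sums)) and \
--            all(curr == true for curr, true in zip(current_col_sums, true_col_sums))
--
--     return is_solved
-- ===== SOURCE B (Python) =====
-- def is_puzzle_solved(current_config, true_config, k):
--     if k <= 0:
--         return True
--
--     def counts(config):
--         rows = {}
--         cols = {}
--         for idx, color in enumerate(config):
--             rkey = (idx // k, color)
--             rows[rkey] = rows.get(rkey, 0) + 1
--             ckey = (idx % k, color)
--             cols[ckey] = cols.get(ckey, 0) + 1
--         return rows, cols
--
--     cur_rows, cur_cols = counts(current_config)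
--     true_rows, true_cols = counts(true_config)
--     return all(cur_rows.get((i, c), 0) == true_rows.get((i, c), 0)
--                and cur_cols.get((i, c), 0) == true_cols.get((i, c), 0)
--                for i in range(k) for c in ("danger", "success", "primary"))
-- ===== Notes on version B (the rewrite author's own statement) =====
-- stated objective: alternative
-- what changed: Replaces the slice-per-row/column plus list.count strategy with a single enumerate pass per configuration that builds (index,color)-keyed count dictionaries (row key idx//k, column key idx%k), then compares the counts for the three non-blank colors over i in range(k).
import Mathlib
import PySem

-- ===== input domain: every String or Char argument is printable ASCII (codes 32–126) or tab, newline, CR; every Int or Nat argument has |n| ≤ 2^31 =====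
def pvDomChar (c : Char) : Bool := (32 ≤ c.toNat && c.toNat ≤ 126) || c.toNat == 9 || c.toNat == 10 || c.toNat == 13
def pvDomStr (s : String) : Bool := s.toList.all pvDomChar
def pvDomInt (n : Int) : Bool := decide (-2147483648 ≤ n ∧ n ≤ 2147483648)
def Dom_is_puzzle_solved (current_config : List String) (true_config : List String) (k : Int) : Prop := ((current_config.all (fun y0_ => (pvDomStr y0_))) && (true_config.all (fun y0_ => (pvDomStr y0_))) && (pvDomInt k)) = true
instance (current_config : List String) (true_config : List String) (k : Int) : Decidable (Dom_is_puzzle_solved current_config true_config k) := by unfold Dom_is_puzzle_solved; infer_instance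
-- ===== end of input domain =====

-- B replaces A's slice-per-row/column + list.count strategy by a single enumerate pass per
-- configuration building (index,color)-keyed count dictionaries, compared afterwards ("alternative").

-- ===== PORT A =====
def pvCOLORS : List String := ["blank", "danger", "success", "primary"]

def compute_color_sums (color_config : List String) : List Int :=
  (PySem.List.slice pvCOLORS (some 1) none).map
    (fun color => (PySem.List.count color_config color : Int))

-- the '.getD []' on slice? is only reached with i ∈ range(k), hence k ≥ 1 ≠ 0: slice? is some there
def is_puzzle_solved (current_config : List String) (true_config : List String) (k : Int) : Bool :=
  let current_row_sums := (PySem.List.pyRange 0 k 1).map (fun i =>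
    compute_color_sums (PySem.List.slice current_config (some (i * k)) (some ((i + 1) * k))))
  let current_col_sums := (PySem.List.pyRange 0 k 1).map (fun i =>
    compute_color_sums ((PySem.List.slice? current_config (some i) none k).getD []))
  let true_row_sums := (PySem.List.pyRange 0 k 1).map (fun i =>
    compute_color_sums (PySem.List.slice true_config (some (i * k)) (some ((i + 1) * k))))
  let true_col_sums := (PySem.List.pyRange 0 k 1).map (fun i =>
    compute_color_sums ((PySem.List.slice? true_config (some i) none k).getD []))
  ((current_row_sums.zip true_row_sums).all (fun p => p.1 == p.2)) &&
    ((current_col_sums.zip true_col_sums).all (fun p => p.1 == p.2))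

-- ===== PORT B =====
def pvColors3 : List String := ["danger", "success", "primary"]

def pvCounts (config : List String) (k : Int) :
    PySem.Dict (Int × String) Int × PySem.Dict (Int × String) Int :=
  (PySem.List.enumerate config 0).foldl
    (fun s p =>
      (s.1.insert (PySem.Int.floordiv p.1 k, p.2) (s.1.getD (PySem.Int.floordiv p.1 k, p.2) 0 + 1),
       s.2.insert (PySem.Int.mod p.1 k, p.2) (s.2.getD (PySem.Int.mod p.1 k, p.2) 0 + 1)))
    (PySem.Dict.empty, PySem.Dict.empty)

def is_puzzle_solved_alt (current_config : List String) (true_config : List String) (k : Int) : Bool :=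
  if k ≤ 0 then true
  else
    let cur := pvCounts current_config k
    let tru := pvCounts true_config k
    (PySem.List.pyRange 0 k 1).all (fun i => pvColors3.all (fun c =>
      (cur.1.getD (i, c) 0 == tru.1.getD (i, c) 0) &&
        (cur.2.getD (i, c) 0 == tru.2.getD (i, c) 0)))

-- ===== PRECONDITION & SPEC =====
def Spec_is_puzzle_solved (current_config : List String) (true_config : List String) (k : Int) (out : Bool) : Prop := out = is_puzzle_solved_alt current_config true_config k
instance (current_config : List String) (true_config : List String) (k : Int) (out : Bool) : Decidable (Spec_is_puzzle_solved current_config true_config k out) := by unfold Spec_is_puzzle_solved; infer_instance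

-- ===== CLAIM (what is proved, stated in full; the proofs are below) =====
def Claim_equal_is_puzzle_solved : Prop := ∀ (current_config : List String) (true_config : List String) (k : Int), Dom_is_puzzle_solved current_config true_config k → Spec_is_puzzle_solved current_config true_config k (is_puzzle_solved current_config true_config k)

-- ===== LEMMAS AND PROOFS =====

lemma pv_filter_interval_range (n a b : Nat) :
    (List.range n).filter (fun m => decide (a ≤ m ∧ m < a + b)) =
      (List.range (min b (n - a))).map (fun t => a + t) := by
  apply List.Perm.eq_of_pairwise (le := (· < ·))
  · intro x y _ _ h1 h2; omega
  · exact List.Pairwise.filter _ List.pairwise_lt_range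
  · exact List.pairwise_lt_range.map _ (by intro x y h; omega)
  · rw [List.perm_ext_iff_of_nodup]
    · intro m
      simp only [List.mem_filter, List.mem_range, List.mem_map, decide_eq_true_eq]
      constructor
      · rintro ⟨hm, ha, hb⟩; exact ⟨m - a, by omega, by omega⟩
      · rintro ⟨t, ht, rfl⟩; omega
    · exact List.nodup_range.filter _
    · exact List.nodup_range.map (by intro x y h; simpa using h)

lemma pv_take_drop_eq_map_range {α : Type} (xs : List α) (a b : Nat) (d : α) :
    (xs.drop a).take b = (List.range (min b (xs.length - a))).map (fun t => xs.getD (a + t) d) := by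
  apply List.ext_getElem
  · simp
  · intro i h1 h2
    have hlen : i < (xs.drop a).length := by simp at h1 ⊢; omega
    have hx : a + i < xs.length := by simp at h1; omega
    simp only [List.getElem_take, List.getElem_drop, List.getElem_map, List.getElem_range]
    rw [List.getD_eq_getElem _ _ hx]

lemma pv_filter_mod_range (n j k : Nat) (hk : 0 < k) (hjk : j < k) :
    (List.range n).filter (fun m => m % k == j) =
      (List.range ((n - j + k - 1) / k)).map (fun t => j + k * t) := by
  apply List.Perm.eq_of_pairwise (le := (· < ·))
  · intro x y _ _ h1 h2; omega
  · exact List.Pairwise.filter _ List.pairwise_lt_range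
  · refine List.pairwise_lt_range.map _ (by intro x y h; nlinarith)
  · rw [List.perm_ext_iff_of_nodup]
    · intro m
      simp only [List.mem_filter, List.mem_range, List.mem_map, beq_iff_eq]
      constructor
      · rintro ⟨hm, hmod⟩
        have h2 := Nat.div_add_mod m k
        refine ⟨m / k, ?_, by omega⟩
        have h1 : m / k + 1 ≤ (n - j + k - 1) / k := by
          rw [Nat.le_div_iff_mul_le hk]
          have h3 : (m / k + 1) * k = k * (m / k) + k := by ring
          omega
        omega
      · rintro ⟨t, ht, rfl⟩
        have h1 : t + 1 ≤ (n - j + k - 1) / k := ht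
        rw [Nat.le_div_iff_mul_le hk] at h1
        have h3 : (t + 1) * k = k * t + k := by ring
        refine ⟨by omega, ?_⟩
        rw [Nat.add_mul_mod_self_left]
        exact Nat.mod_eq_of_lt hjk
    · exact List.nodup_range.filter _
    · exact List.nodup_range.map (by intro x y h; simp at h; omega)

def pvRowCnt (xs : List String) (k j : Nat) (c : String) : Nat :=
  (List.range xs.length).countP (fun m => decide (j * k ≤ m ∧ m < j * k + k) && (xs.getD m "" == c))

def pvColCnt (xs : List String) (k j : Nat) (c : String) : Nat :=
  (List.range xs.length).countP (fun m => (m % k == j) && (xs.getD m "" == c))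

lemma pv_countP_interval (xs : List String) (a b : Nat) (c : String) :
    List.count c ((xs.drop a).take b) =
      (List.range xs.length).countP (fun m => decide (a ≤ m ∧ m < a + b) && (xs.getD m "" == c)) := by
  rw [pv_take_drop_eq_map_range xs a b ""]
  rw [List.count_eq_countP, List.countP_map]
  have h := List.countP_filter (p := fun m => xs.getD m "" == c)
      (q := fun m => decide (a ≤ m ∧ m < a + b)) (l := List.range xs.length)
  rw [show (fun m => decide (a ≤ m ∧ m < a + b) && (xs.getD m "" == c)) =
      (fun m => (xs.getD m "" == c) && decide (a ≤ m ∧ m < a + b)) from by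
    funext m; rw [Bool.and_comm], ← h, pv_filter_interval_range, List.countP_map]
  rfl

lemma pv_rowcnt_eq (xs : List String) (k j : Nat) (c : String) :
    List.count c ((xs.drop (j * k)).take k) = pvRowCnt xs k j c := by
  rw [pvRowCnt, pv_countP_interval]

lemma pv_slice_step_eq (xs : List String) (k j : Nat) (hk : 0 < k) :
    PySem.List.slice? xs (some (j : Int)) none (k : Int) =
      some ((List.range ((xs.length - j + k - 1) / k)).map (fun t => xs.getD (j + k * t) "")) := by
  have hk0 : ((k : Int) = 0) = False := by simp; omega
  have hkneg : ((k : Int) < 0) = False := by simp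
  have hjneg : ((j : Int) < 0) = False := by simp
  have hkpos : ((0 : Int) < ↑k) = True := by simp; omega
  simp only [PySem.List.slice?, PySem.List.sliceIndices, hk0, hkneg, hjneg, hkpos,
    if_false, if_true, Option.some.injEq]
  by_cases hjn : j < xs.length
  · have hmin : min (j : Int) (xs.length : Int) = (j : Int) := by omega
    have hlt : ((j : Int) < (xs.length : Int)) = True := by simp; omega
    rw [hmin]; simp only [hlt, if_true]
    have hC : (((xs.length : Int) - ↑j + ↑k - 1) / ↑k).toNat = (xs.length - j + k - 1) / k := by
      have h1 : ((xs.length : Int) - ↑j + ↑k - 1) = ((xs.length - j + k - 1 : Nat) : Int) := by omega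
      rw [h1, ← Int.natCast_div]
      exact Int.toNat_natCast _
    rw [hC]
    rw [List.filterMap_congr (g := fun t => some (xs.getD (j + k * t) ""))]
    · simp
    · intro t ht
      simp only [List.mem_range] at ht
      have hb : j + k * t < xs.length := by
        have h1 : t + 1 ≤ (xs.length - j + k - 1) / k := ht
        rw [Nat.le_div_iff_mul_le hk] at h1
        have h3 : (t + 1) * k = k * t + k := by ring
        omega
      have hidx : ((j : Int) + ↑k * ↑t).toNat = j + k * t := by omega
      rw [hidx, List.getElem?_eq_getElem hb, List.getD_eq_getElem _ _ hb]
  · have hmin : min (j : Int) (xs.length : Int) = (xs.length : Int) := by omega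
    have hlt : ((xs.length : Int) < (xs.length : Int)) = False := by simp
    rw [hmin]; simp only [hlt, if_false]
    have hC : (xs.length - j + k - 1) / k = 0 := by
      have : xs.length - j = 0 := by omega
      rw [this]
      exact Nat.div_eq_of_lt (by omega)
    rw [hC]
    simp

lemma pv_colcnt_eq (xs : List String) (k j : Nat) (hk : 0 < k) (hjk : j < k) (c : String) :
    List.count c ((PySem.List.slice? xs (some (j : Int)) none (k : Int)).getD []) = pvColCnt xs k j c := by
  rw [pv_slice_step_eq xs k j hk, Option.getD_some]
  rw [List.count_eq_countP, List.countP_map]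
  rw [pvColCnt]
  rw [show (fun m => (m % k == j) && (xs.getD m "" == c)) =
      (fun m => (xs.getD m "" == c) && (m % k == j)) from by funext m; rw [Bool.and_comm]]
  rw [← List.countP_filter, pv_filter_mod_range _ j k hk hjk, List.countP_map]
  rfl

lemma pvCounts_eq (xs : List String) (k : Int) :
    pvCounts xs k =
      ((PySem.List.enumerate xs 0).foldl (fun d p =>
          d.insert (PySem.Int.floordiv p.1 k, p.2) (d.getD (PySem.Int.floordiv p.1 k, p.2) 0 + 1)) PySem.Dict.empty,
       (PySem.List.enumerate xs 0).foldl (fun d p =>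
          d.insert (PySem.Int.mod p.1 k, p.2) (d.getD (PySem.Int.mod p.1 k, p.2) 0 + 1)) PySem.Dict.empty) := by
  rw [pvCounts]
  exact PySem.List.foldl_prod_mk
    (f := fun (d : PySem.Dict (Int × String) Int) (p : Int × String) =>
      d.insert (PySem.Int.floordiv p.1 k, p.2) (d.getD (PySem.Int.floordiv p.1 k, p.2) 0 + 1))
    (g := fun (d : PySem.Dict (Int × String) Int) (p : Int × String) =>
      d.insert (PySem.Int.mod p.1 k, p.2) (d.getD (PySem.Int.mod p.1 k, p.2) 0 + 1))
    _ _ _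

lemma pv_B_col (xs : List String) (K j : Nat) (_hK : 0 < K) (_hjK : j < K) (c : String) :
    (pvCounts xs (K : Int)).2.getD ((j : Int), c) 0 = (pvColCnt xs K j c : Int) := by
  rw [pvCounts_eq]
  rw [show (fun (d : PySem.Dict (Int × String) Int) (p : Int × String) =>
      d.insert (PySem.Int.mod p.1 K, p.2) (d.getD (PySem.Int.mod p.1 K, p.2) 0 + 1)) =
    (fun (d : PySem.Dict (Int × String) Int) (p : Int × String) =>
      (fun d x => d.insert x (d.getD x 0 + 1)) d ((fun (p : Int × String) => ((PySem.Int.mod p.1 K, p.2) : Int × String)) p)) from rfl]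
  have hm := List.foldl_map
    (f := fun p : Int × String => ((PySem.Int.mod p.1 (K : Int), p.2) : Int × String))
    (g := fun (d : PySem.Dict (Int × String) Int) x => d.insert x (d.getD x 0 + 1))
    (l := PySem.List.enumerate xs 0) (init := PySem.Dict.empty)
  rw [← hm]
  rw [PySem.Dict.getD_foldl_insert_add_one]
  simp only [PySem.Dict.getD_empty, zero_add, Nat.cast_inj]
  rw [List.count_eq_countP, List.countP_map]
  rw [PySem.List.enumerate_eq_map_pyRange xs "", PySem.List.len_eq, PySem.List.pyRange_zero_natCast,
    List.countP_map, List.countP_map]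
  rw [pvColCnt]
  apply List.countP_congr
  intro m hm
  simp only [Function.comp_apply, PySem.Int.mod_natCast, PySem.List.pyGetD_natCast,
    Prod.mk.injEq, beq_iff_eq]
  simp
  intro _
  omega

lemma pv_B_row (xs : List String) (K j : Nat) (hK : 0 < K) (hjK : j < K) (c : String) :
    (pvCounts xs (K : Int)).1.getD ((j : Int), c) 0 = (pvRowCnt xs K j c : Int) := by
  rw [pvCounts_eq]
  rw [show (fun (d : PySem.Dict (Int × String) Int) (p : Int × String) =>
      d.insert (PySem.Int.floordiv p.1 K, p.2) (d.getD (PySem.Int.floordiv p.1 K, p.2) 0 + 1)) =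
    (fun (d : PySem.Dict (Int × String) Int) (p : Int × String) =>
      (fun d x => d.insert x (d.getD x 0 + 1)) d ((fun (p : Int × String) => ((PySem.Int.floordiv p.1 K, p.2) : Int × String)) p)) from rfl]
  have hm := List.foldl_map
    (f := fun p : Int × String => ((PySem.Int.floordiv p.1 (K : Int), p.2) : Int × String))
    (g := fun (d : PySem.Dict (Int × String) Int) x => d.insert x (d.getD x 0 + 1))
    (l := PySem.List.enumerate xs 0) (init := PySem.Dict.empty)
  rw [← hm]
  rw [PySem.Dict.getD_foldl_insert_add_one]
  simp only [PySem.Dict.getD_empty, zero_add, Nat.cast_inj]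
  rw [List.count_eq_countP, List.countP_map]
  rw [PySem.List.enumerate_eq_map_pyRange xs "", PySem.List.len_eq, PySem.List.pyRange_zero_natCast,
    List.countP_map, List.countP_map]
  rw [pvRowCnt]
  apply List.countP_congr
  intro m hm2
  simp only [Function.comp_apply, PySem.Int.floordiv_natCast, PySem.List.pyGetD_natCast,
    Prod.mk.injEq, beq_iff_eq, Bool.and_eq_true, decide_eq_true_eq, Nat.cast_inj]
  have hdm := Nat.div_add_mod m K
  have hmod := Nat.mod_lt m hK
  have hcomm : j * K = K * j := Nat.mul_comm j K
  constructor
  · rintro ⟨hdiv, hc⟩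
    rw [hdiv] at hdm
    exact ⟨⟨by omega, by omega⟩, hc⟩
  · rintro ⟨⟨h1, h2⟩, hc⟩
    refine ⟨Nat.div_eq_of_lt_le (by omega) (by
      have : (j + 1) * K = j * K + K := by ring
      omega), hc⟩

lemma pv_ccs_expand (l : List String) :
    compute_color_sums l = [(PySem.List.count l "danger" : Int),
      (PySem.List.count l "success" : Int), (PySem.List.count l "primary" : Int)] := rfl

lemma pv_ccs_row (xs : List String) (K j : Nat) :
    compute_color_sums (PySem.List.slice xs (some ((j : Int) * K)) (some (((j : Int) + 1) * K))) =
      [(pvRowCnt xs K j "danger" : Int), (pvRowCnt xs K j "success" : Int),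
        (pvRowCnt xs K j "primary" : Int)] := by
  have hb : ((j : Int) * K) = ((j * K : Nat) : Int) := by push_cast; ring
  have hb2 : (((j : Int) + 1) * K) = ((j * K : Nat) : Int) + ((K : Nat) : Int) := by push_cast; ring
  rw [hb, hb2, PySem.List.slice_natCast_add, pv_ccs_expand]
  simp only [PySem.List.count_eq, pv_rowcnt_eq]

lemma pv_ccs_col (xs : List String) (K j : Nat) (hK : 0 < K) (hjK : j < K) :
    compute_color_sums ((PySem.List.slice? xs (some (j : Int)) none (K : Int)).getD []) =
      [(pvColCnt xs K j "danger" : Int), (pvColCnt xs K j "success" : Int),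
        (pvColCnt xs K j "primary" : Int)] := by
  rw [pv_ccs_expand]
  simp only [PySem.List.count_eq, pv_colcnt_eq xs K j hK hjK]

theorem pv_main (cur tru : List String) (k : Int) :
    is_puzzle_solved cur tru k = is_puzzle_solved_alt cur tru k := by
  by_cases hk : k ≤ 0
  · simp [is_puzzle_solved, is_puzzle_solved_alt, hk, PySem.List.pyRange_one_eq_nil hk]
  · have hk2 : 0 < k := lt_of_not_ge hk
    lift k to Nat using hk2.le with K hK
    have hKpos : 0 < K := by exact_mod_cast hk2
    simp only [is_puzzle_solved, is_puzzle_solved_alt, if_neg hk]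
    rw [List.zip_map', List.zip_map', List.all_map, List.all_map]
    rw [PySem.List.pyRange_zero_natCast, List.all_map, List.all_map, List.all_map]
    rw [Bool.eq_iff_iff]
    simp only [List.all_eq_true, Bool.and_eq_true, Function.comp_apply, beq_iff_eq, List.mem_range]
    constructor
    · rintro ⟨h1, h2⟩ j hj c hc
      have e1 := h1 j hj
      have e2 := h2 j hj
      rw [pv_ccs_row, pv_ccs_row] at e1
      rw [pv_ccs_col cur K j hKpos hj, pv_ccs_col tru K j hKpos hj] at e2
      simp only [List.cons.injEq, and_true, Nat.cast_inj] at e1 e2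
      rw [pv_B_row cur K j hKpos hj c, pv_B_row tru K j hKpos hj c,
        pv_B_col cur K j hKpos hj c, pv_B_col tru K j hKpos hj c]
      simp only [pvColors3, List.mem_cons, List.not_mem_nil, or_false] at hc
      rcases hc with rfl | rfl | rfl
      · exact ⟨by exact_mod_cast e1.1, by exact_mod_cast e2.1⟩
      · exact ⟨by exact_mod_cast e1.2.1, by exact_mod_cast e2.2.1⟩
      · exact ⟨by exact_mod_cast e1.2.2, by exact_mod_cast e2.2.2⟩
    · intro h
      constructor
      · intro j hj
        have hd := h j hj "danger" (by simp [pvColors3])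
        have hs := h j hj "success" (by simp [pvColors3])
        have hp := h j hj "primary" (by simp [pvColors3])
        rw [pv_B_row cur K j hKpos hj _, pv_B_row tru K j hKpos hj _] at hd hs hp
        simp only [Nat.cast_inj] at hd hs hp
        rw [pv_ccs_row, pv_ccs_row]
        simp only [List.cons.injEq, and_true, Nat.cast_inj]
        exact ⟨hd.1, hs.1, hp.1⟩
      · intro j hj
        have hd := h j hj "danger" (by simp [pvColors3])
        have hs := h j hj "success" (by simp [pvColors3])
        have hp := h j hj "primary" (by simp [pvColors3])
        rw [pv_B_col cur K j hKpos hj _, pv_B_col tru K j hKpos hj _] at hd hs hp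
        simp only [Nat.cast_inj] at hd hs hp
        rw [pv_ccs_col cur K j hKpos hj, pv_ccs_col tru K j hKpos hj]
        simp only [List.cons.injEq, and_true, Nat.cast_inj]
        exact ⟨hd.2, hs.2, hp.2⟩

-- ===== VERDICT (by name: the statement is the Claim_ definition above) =====
theorem is_puzzle_solved_spec : Claim_equal_is_puzzle_solved := by
  intro current_config true_config k _
  unfold Spec_is_puzzle_solved
  exact pv_main current_config true_config k
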